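-- pv_equiv track=rewrite | github.com/Mjkim-Programming/BOJ | PyPy3/백준/Gold/1083. 소트/소트.py | max_lex_with_swaps
-- ===== SOURCE A (Python) =====
-- def max_lex_with_swaps(arr, S):
--     n = len(arr)
--     arr = arr[:]
--     for i in range(n):
--         if S <= 0:
--             break
--         max_pos = i
--         for j in range(i+1, min(n, i+S+1)):
--             if arr[j] > arr[max_pos]:
--                 max_pos = j
--
--         while max_pos > i and S > 0:
--             arr[max_pos], arr[max_pos-1] = arr[max_pos-1], arr[max_pos]
--             max_pos -= 1
--             S -= 1
--
--     return arr
-- ===== SOURCE B (Python) =====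
-- def max_lex_with_swaps(arr, S):
--     # Selection by slicing: repeatedly pick the first maximum of the reachable
--     # window and move it to the front, building the result front-to-back.
--     arr = list(arr)
--     out = []
--     while S > 0 and arr:
--         window = arr[:S+1]
--         k = window.index(max(window))
--         out.append(arr[k])
--         arr = arr[:k] + arr[k+1:]
--         S -= k
--     return out + arr
-- ===== Notes on version B (the rewrite author's own statement) =====
-- stated objective: simpler
-- what changed: A mutates a copy in place, scanning a window and bubbling the maximum forward with adjacent swaps; B is a short recursion that selects the first maximum of the reachable window and moves it to the front by slicing, building the result front-to-back.
import Mathlib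
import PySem

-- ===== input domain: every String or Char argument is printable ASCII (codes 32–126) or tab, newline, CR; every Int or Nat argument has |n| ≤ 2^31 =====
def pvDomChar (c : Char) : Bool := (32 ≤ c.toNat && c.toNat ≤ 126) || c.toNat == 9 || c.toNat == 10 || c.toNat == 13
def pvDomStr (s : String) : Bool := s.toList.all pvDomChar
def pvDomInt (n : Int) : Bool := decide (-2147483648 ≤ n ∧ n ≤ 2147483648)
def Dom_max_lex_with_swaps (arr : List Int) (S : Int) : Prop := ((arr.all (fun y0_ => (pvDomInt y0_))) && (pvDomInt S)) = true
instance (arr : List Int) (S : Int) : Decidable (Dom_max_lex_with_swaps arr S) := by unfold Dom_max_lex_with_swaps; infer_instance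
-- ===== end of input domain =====

-- B replaces A's in-place bubbling pass by a recursive selection that moves the first
-- maximum of the reachable window to the front by slicing (objective: simpler).

-- ===== PORT A =====
-- Python's `while max_pos > i and S > 0:` swap loop; the simultaneous assignment reads
-- both old values first.  Indices are nonnegative and in range, so Nat indexing with
-- List.getD/List.set is exact here.
def pvBubble (l : List Int) (i mp : Nat) (S : Int) : List Int × Int :=
  if h : i < mp ∧ 0 < S then
    pvBubble ((l.set mp (l.getD (mp - 1) 0)).set (mp - 1) (l.getD mp 0)) i (mp - 1) (S - 1)
  else (l, S)
termination_by mp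
decreasing_by omega

-- the `for i in range(n)` loop (the `break` returns the current list, as nothing follows);
-- `range(i+1, min(n, i+S+1))` has nonnegative bounds (S > 0 on this branch), so
-- List.range' over Nat is exact.
def pvLoopA (l : List Int) (S : Int) (i n : Nat) : List Int :=
  if h : i < n then
    if S ≤ 0 then l
    else
      let js := List.range' (i + 1) (min n (i + S.toNat + 1) - (i + 1))
      let mp := js.foldl (fun mp j => if l.getD j 0 > l.getD mp 0 then j else mp) i
      let r := pvBubble l i mp S
      pvLoopA r.1 r.2 (i + 1) n
  else l
termination_by n - i

def max_lex_with_swaps (arr : List Int) (S : Int) : List Int :=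
  pvLoopA arr S 0 arr.length

-- ===== PORT B =====
-- termination helper for the port of B: `window.index(max(window))` is < len(arr)
theorem pv_index_getD_lt {w : List Int} {v : Int} (hw : w ≠ []) :
    (PySem.List.index? w v).getD 0 < w.length := by
  cases hidx : PySem.List.index? w v with
  | none => simpa using List.length_pos_iff.mpr hw
  | some k =>
    obtain ⟨pre, suf, hw', hlen, _⟩ := (PySem.List.index?_eq_some_iff w v k).mp hidx
    simp [hw', ← hlen]

-- the `while S > 0 and arr:` loop with accumulator `out`
def pvLoopB (out : List Int) (arr : List Int) (S : Int) : List Int :=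
  if h : 0 < S ∧ arr ≠ [] then
    let window := arr.take (S + 1).toNat                                   -- arr[:S+1]
    let k := (PySem.List.index? window
                ((PySem.List.max? window (fun x => x)).getD 0)).getD 0     -- window.index(max(window))
    pvLoopB (out ++ [arr.getD k 0]) (arr.take k ++ arr.drop (k + 1)) (S - k)
  else out ++ arr
termination_by arr.length
decreasing_by
  have harr : arr ≠ [] := h.2
  have hwne : arr.take (S + 1).toNat ≠ [] := by
    have hS : 0 < S := h.1
    simp [List.take_eq_nil_iff, harr]
    omega
  have h1 : (List.idxOf? ((PySem.List.max? (arr.take (S + 1).toNat) (fun x => x)).getD 0)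
      (arr.take (S + 1).toNat)).getD 0 < (arr.take (S + 1).toNat).length := by
    rw [← PySem.List.index?_eq_idxOf?]
    exact pv_index_getD_lt hwne
  have h1' := pv_index_getD_lt (v := (PySem.List.max? (arr.take (S + 1).toNat) (fun x => x)).getD 0) hwne
  have h2 : (arr.take (S + 1).toNat).length ≤ arr.length := by simp
  simp only [List.length_append, List.length_take, List.length_drop]
  omega

def max_lex_with_swaps_alt (arr : List Int) (S : Int) : List Int :=
  pvLoopB [] arr S

-- ===== PRECONDITION & SPEC =====
def Spec_max_lex_with_swaps (arr : List Int) (S : Int) (out : List Int) : Prop := out = max_lex_with_swaps_alt arr S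
instance (arr : List Int) (S : Int) (out : List Int) : Decidable (Spec_max_lex_with_swaps arr S out) := by unfold Spec_max_lex_with_swaps; infer_instance

-- ===== CLAIM (what is proved, stated in full; the proofs are below) =====
def Claim_equal_max_lex_with_swaps : Prop := ∀ (arr : List Int) (S : Int), Dom_max_lex_with_swaps arr S → Spec_max_lex_with_swaps arr S (max_lex_with_swaps arr S)

-- ===== LEMMAS AND PROOFS =====

-- proof-only recursive characterisation of B's loop (one step per selected element)
def pvAltRec (arr : List Int) (S : Int) : List Int :=
  if h : S ≤ 0 ∨ arr = [] then arr
  else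
    let window := arr.take (S + 1).toNat
    let k := (PySem.List.index? window
                ((PySem.List.max? window (fun x => x)).getD 0)).getD 0
    arr.getD k 0 :: pvAltRec (arr.take k ++ arr.drop (k + 1)) (S - k)
termination_by arr.length
decreasing_by
  have harr : arr ≠ [] := by tauto
  have hwne : arr.take (S + 1).toNat ≠ [] := by
    have hS : ¬ S ≤ 0 := by tauto
    simp [List.take_eq_nil_iff, harr]
    omega
  have h1 : (List.idxOf? ((PySem.List.max? (arr.take (S + 1).toNat) (fun x => x)).getD 0)
      (arr.take (S + 1).toNat)).getD 0 < (arr.take (S + 1).toNat).length := by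
    rw [← PySem.List.index?_eq_idxOf?]
    exact pv_index_getD_lt hwne
  have h1' := pv_index_getD_lt (v := (PySem.List.max? (arr.take (S + 1).toNat) (fun x => x)).getD 0) hwne
  have h2 : (arr.take (S + 1).toNat).length ≤ arr.length := by simp
  simp only [List.length_append, List.length_take, List.length_drop]
  omega

-- B's while loop appends pvAltRec's output to the accumulator
theorem pvLoopB_eq_altRec (n : Nat) : ∀ (arr : List Int), arr.length ≤ n →
    ∀ (out : List Int) (S : Int), pvLoopB out arr S = out ++ pvAltRec arr S := by
  induction n with
  | zero =>
    intro arr hn out S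
    have harr : arr = [] := by
      cases arr with
      | nil => rfl
      | cons a t => simp at hn
    subst harr
    rw [pvLoopB, dif_neg (by simp), pvAltRec, dif_pos (Or.inr rfl)]
  | succ n ih =>
    intro arr hn out S
    by_cases hcond : 0 < S ∧ arr ≠ []
    · rw [pvLoopB, dif_pos hcond, pvAltRec, dif_neg (by push Not; exact ⟨by omega, hcond.2⟩)]
      have hwne : arr.take (S + 1).toNat ≠ [] := by
        simp [List.take_eq_nil_iff, hcond.2]
        omega
      have hk := pv_index_getD_lt
        (v := (PySem.List.max? (arr.take (S + 1).toNat) (fun x => x)).getD 0) hwne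
      have hkarr : (PySem.List.index? (arr.take (S + 1).toNat)
          ((PySem.List.max? (arr.take (S + 1).toNat) (fun x => x)).getD 0)).getD 0 < arr.length := by
        have : (arr.take (S + 1).toNat).length ≤ arr.length := by simp
        omega
      have hkarr' : (List.idxOf? ((PySem.List.max? (arr.take (S + 1).toNat) (fun x => x)).getD 0)
          (arr.take (S + 1).toNat)).getD 0 < arr.length := by
        rw [← PySem.List.index?_eq_idxOf?]
        exact hkarr
      rw [ih _ (by simp; omega) _ _]
      simp
    · rw [pvLoopB, dif_neg hcond, pvAltRec,
        dif_pos (by rcases not_and_or.mp hcond with h | h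
                    · exact Or.inl (by omega)
                    · exact Or.inr (by push Not at h; exact h))]


-- `k` is the first index of a maximum of `w` on the prefix of length `t`
def pvIsFA (w : List Int) (t k : Nat) : Prop :=
  k < t ∧ (∀ j, j < t → w.getD j 0 ≤ w.getD k 0) ∧ (∀ j, j < k → w.getD j 0 < w.getD k 0)

theorem pvIsFA_unique {w : List Int} {t k₁ k₂ : Nat}
    (h₁ : pvIsFA w t k₁) (h₂ : pvIsFA w t k₂) : k₁ = k₂ := by
  obtain ⟨hl₁, hmax₁, hfst₁⟩ := h₁
  obtain ⟨hl₂, hmax₂, hfst₂⟩ := h₂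
  rcases Nat.lt_trichotomy k₁ k₂ with h | h | h
  · exact absurd (hmax₁ k₂ hl₂) (not_le.mpr (hfst₂ k₁ h))
  · exact h
  · exact absurd (hmax₂ k₁ hl₁) (not_le.mpr (hfst₁ k₂ h))

-- one scan step of A's inner `for j` loop preserves the first-argmax invariant
theorem pvIsFA_step {w : List Int} {t k : Nat} (h : pvIsFA w t k) :
    pvIsFA w (t + 1) (if w.getD t 0 > w.getD k 0 then t else k) := by
  obtain ⟨hl, hmax, hfst⟩ := h
  split_ifs with hgt
  · refine ⟨Nat.lt_succ_self t, ?_, ?_⟩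
    · intro j hj
      rcases Nat.lt_succ_iff_lt_or_eq.mp hj with hj | hj
      · exact le_of_lt (lt_of_le_of_lt (hmax j hj) hgt)
      · simp [hj]
    · intro j hj
      exact lt_of_le_of_lt (hmax j hj) hgt
  · refine ⟨Nat.lt_succ_of_lt hl, ?_, hfst⟩
    intro j hj
    rcases Nat.lt_succ_iff_lt_or_eq.mp hj with hj | hj
    · exact hmax j hj
    · subst hj
      exact not_lt.mp hgt

-- A's inner scan over range' 1 t computes the first argmax of the first t+1 entries
theorem pv_fold_isFA (w : List Int) :
    ∀ t, t + 1 ≤ w.length →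
      pvIsFA w (t + 1)
        ((List.range' 1 t).foldl (fun mp j => if w.getD j 0 > w.getD mp 0 then j else mp) 0) := by
  intro t
  induction t with
  | zero =>
    intro h
    exact ⟨Nat.zero_lt_one, fun j hj => by interval_cases j; rfl, fun j hj => absurd hj (Nat.not_lt_zero j)⟩
  | succ t ih =>
    intro h
    rw [List.range'_1_concat, List.foldl_append, Nat.add_comm 1 t]
    simpa using pvIsFA_step (ih (by omega))

-- B's `window.index(max(window))` is the first argmax of the whole window
theorem pv_kstar_isFA (w : List Int) (hw : w ≠ []) :
    pvIsFA w w.length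
      ((PySem.List.index? w ((PySem.List.max? w (fun x => x)).getD 0)).getD 0) := by
  cases hm : PySem.List.max? w (fun x => x) with
  | none => exact absurd ((PySem.List.max?_eq_none_iff w _).mp hm) hw
  | some m =>
    have hmem : m ∈ w := PySem.List.max?_mem hm
    have hmax : ∀ y ∈ w, y ≤ m := PySem.List.max?_isMax hm
    cases hidx : PySem.List.index? w m with
    | none => exact absurd hmem ((PySem.List.index?_eq_none_iff w m).mp hidx)
    | some k =>
      obtain ⟨hk, hkm, hfst⟩ := PySem.List.getElem_of_index?_eq_some hidx
      simp only [hidx, Option.getD_some]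
      refine ⟨hk, ?_, ?_⟩
      · intro j hj
        rw [List.getD_eq_getElem _ _ hj, List.getD_eq_getElem _ _ hk, hkm]
        exact hmax _ (List.getElem_mem hj)
      · intro j hj
        have hjlt : j < w.length := lt_trans hj hk
        rw [List.getD_eq_getElem _ _ hjlt, List.getD_eq_getElem _ _ hk, hkm]
        exact lt_of_le_of_ne (hmax _ (List.getElem_mem hjlt)) (hfst j hj)

-- swapping positions |P| and |P|+1
theorem pv_swap_concat (P Q : List Int) (y x : Int) :
    (((P ++ y :: x :: Q).set (P.length + 1) ((P ++ y :: x :: Q).getD (P.length + 1 - 1) 0)).set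
      (P.length + 1 - 1) ((P ++ y :: x :: Q).getD (P.length + 1) 0)) = P ++ x :: y :: Q := by
  have hx : (P ++ y :: x :: Q).getD (P.length + 1) 0 = x := by
    rw [List.getD_eq_getElem?_getD, List.getElem?_append_right (by omega)]
    simp
  have hy : (P ++ y :: x :: Q).getD (P.length + 1 - 1) 0 = y := by
    rw [List.getD_eq_getElem?_getD, Nat.add_sub_cancel, List.getElem?_append_right (by omega)]
    simp
  rw [hx, hy, List.set_append_right _ _ (by omega), Nat.add_sub_cancel_left,
    List.set_append_right _ _ (by omega), Nat.add_sub_cancel, Nat.sub_self]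
  rfl

-- A's while-loop moves the element at position |P|+|M| to position |P|, shifting M right
theorem pv_bubble_eq (P : List Int) (M : List Int) (x : Int) (Q : List Int) (S : Int)
    (hS : (M.length : Int) ≤ S) :
    pvBubble (P ++ M ++ x :: Q) P.length (P.length + M.length) S = (P ++ x :: (M ++ Q), S - M.length) := by
  induction M using List.reverseRecOn generalizing Q S with
  | nil =>
    rw [pvBubble]
    simp
  | append_singleton M' y ih =>
    have hlen : (P ++ (M' ++ [y]) ++ x :: Q) = (P ++ M') ++ y :: x :: Q := by simp
    have hmp : P.length + (M' ++ [y]).length = (P ++ M').length + 1 := by simp; omega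
    rw [hlen, hmp, pvBubble]
    rw [dif_pos ⟨by simp only [List.length_append]; omega, by simp at hS; omega⟩]
    rw [pv_swap_concat, Nat.add_sub_cancel]
    have h2 : (P ++ M') ++ x :: y :: Q = P ++ M' ++ x :: (y :: Q) := by simp
    have h3 : (P ++ M').length = P.length + M'.length := by simp
    rw [h2, h3, ih (y :: Q) (S - 1) (by simp at hS ⊢; omega)]
    simp only [Prod.mk.injEq]
    exact ⟨by simp, by simp; omega⟩

-- fold over shifted indices on l = fold over window-relative indices on w
theorem pv_fold_shift (l : List Int) (i : Nat) (w : List Int)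
    (hw : ∀ j, j < w.length → w.getD j 0 = l.getD (i + j) 0) :
    ∀ (t a k : Nat), k < w.length → a + t ≤ w.length →
      (List.range' (i + a) t).foldl (fun mp j => if l.getD j 0 > l.getD mp 0 then j else mp) (i + k)
        = i + (List.range' a t).foldl (fun mp j => if w.getD j 0 > w.getD mp 0 then j else mp) k := by
  intro t
  induction t with
  | zero => intro a k _ _; simp
  | succ t ih =>
    intro a k hk hat
    rw [List.range'_succ, List.range'_succ, List.foldl_cons, List.foldl_cons,
      hw a (by omega), hw k (by omega)]
    have hstep : (if l.getD (i + a) 0 > l.getD (i + k) 0 then (i + a) else (i + k))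
        = i + (if l.getD (i + a) 0 > l.getD (i + k) 0 then a else k) := by
      split_ifs <;> rfl
    rw [hstep]
    have h4 := ih (a + 1) (if l.getD (i + a) 0 > l.getD (i + k) 0 then a else k)
      (by split_ifs <;> omega) (by omega)
    rw [show i + (a + 1) = i + a + 1 by omega] at h4
    rw [h4]

-- the main loop invariant: A's loop from position i equals the untouched prefix ++ B on the suffix
theorem pv_main (m : Nat) : ∀ (l : List Int) (S : Int) (i : Nat), l.length - i ≤ m →
    pvLoopA l S i l.length = l.take i ++ pvAltRec (l.drop i) S := by
  induction m with
  | zero =>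
    intro l S i h
    have hi : ¬ i < l.length := by omega
    rw [pvLoopA, dif_neg hi, List.drop_eq_nil_of_le (by omega), pvAltRec]
    simp [List.take_of_length_le (by omega : l.length ≤ i)]
  | succ m ih =>
    intro l S i h
    by_cases hi : i < l.length
    case neg =>
      rw [pvLoopA, dif_neg hi, List.drop_eq_nil_of_le (by omega), pvAltRec]
      simp [List.take_of_length_le (by omega : l.length ≤ i)]
    case pos =>
      by_cases hS : S ≤ 0
      · rw [pvLoopA, dif_pos hi, if_pos hS, pvAltRec, dif_pos (Or.inl hS),
          List.take_append_drop]
      · have hSpos : 0 < S := by omega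
        have hdlen : (l.drop i).length = l.length - i := by simp
        have hdne : l.drop i ≠ [] := by
          intro hcon
          rw [hcon] at hdlen
          simp at hdlen
          omega
        have hc : (S + 1).toNat = S.toNat + 1 := by omega
        have hwl : ((l.drop i).take (S + 1).toNat).length = min (l.length - i) (S.toNat + 1) := by
          simp [hc]
          omega
        have hwne : (l.drop i).take (S + 1).toNat ≠ [] := by
          intro hcon
          rw [hcon] at hwl
          simp at hwl
          omega
        have hFA_B := pv_kstar_isFA ((l.drop i).take (S + 1).toNat) hwne
        have hkBlt := hFA_B.1
        have hkd : (PySem.List.index? ((l.drop i).take (S + 1).toNat)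
            ((PySem.List.max? ((l.drop i).take (S + 1).toNat) (fun x => x)).getD 0)).getD 0
            < (l.drop i).length := by omega
        -- abbreviations
        generalize hkB : (PySem.List.index? ((l.drop i).take (S + 1).toNat)
            ((PySem.List.max? ((l.drop i).take (S + 1).toNat) (fun x => x)).getD 0)).getD 0 = kB
          at hFA_B hkBlt hkd
        -- B takes exactly one step here
        have halt : pvAltRec (l.drop i) S
            = (l.drop i).getD kB 0 ::
              pvAltRec ((l.drop i).take kB ++ (l.drop i).drop (kB + 1)) (S - kB) := by
          rw [pvAltRec, dif_neg (by push Not; exact ⟨by omega, hdne⟩)]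
          simp only [hkB]
        -- window entries agree with l shifted by i
        have hwshift : ∀ j, j < ((l.drop i).take (S + 1).toNat).length →
            ((l.drop i).take (S + 1).toNat).getD j 0 = l.getD (i + j) 0 := by
          intro j hj
          have hjd : j < (l.drop i).length := by omega
          have hin : i + j < l.length := by omega
          rw [List.getD_eq_getElem _ _ hj, List.getD_eq_getElem _ _ hin,
            List.getElem_take, List.getElem_drop]
        -- A's inner scan finds position i + kB
        have hfold : (List.range' (i + 1) (min l.length (i + S.toNat + 1) - (i + 1))).foldl
            (fun mp j => if l.getD j 0 > l.getD mp 0 then j else mp) i = i + kB := by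
          have ht : min l.length (i + S.toNat + 1) - (i + 1)
              = ((l.drop i).take (S + 1).toNat).length - 1 := by omega
          rw [ht]
          have h0 := pv_fold_shift l i ((l.drop i).take (S + 1).toNat) hwshift
            (((l.drop i).take (S + 1).toNat).length - 1) 1 0 (by omega) (by omega)
          have hA := pv_fold_isFA ((l.drop i).take (S + 1).toNat)
            (((l.drop i).take (S + 1).toNat).length - 1) (by omega)
          rw [show ((l.drop i).take (S + 1).toNat).length - 1 + 1
              = ((l.drop i).take (S + 1).toNat).length by omega] at hA
          have huniq := pvIsFA_unique hA hFA_B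
          rw [huniq] at h0
          simpa using h0
        -- the decomposition of l around position i + kB
        have hMlen : ((l.drop i).take kB).length = kB := by simp; omega
        have hPlen : (l.take i).length = i := by simp; omega
        have hdec : l = l.take i ++ (l.drop i).take kB ++ (l.drop i)[kB] :: (l.drop i).drop (kB + 1) := by
          conv_lhs => rw [← List.take_append_drop i l]
          rw [List.append_assoc]
          congr 1
          conv_lhs => rw [← List.take_append_drop kB (l.drop i)]
          rw [List.drop_eq_getElem_cons hkd]
        -- A's while loop moves l[i+kB] to position i
        have hbub : pvBubble l i (i + kB) S
            = (l.take i ++ (l.drop i)[kB] :: ((l.drop i).take kB ++ (l.drop i).drop (kB + 1)), S - kB) := by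
          have hSk : (((l.drop i).take kB).length : Int) ≤ S := by
            rw [hMlen]
            omega
          have h5 := pv_bubble_eq (l.take i) ((l.drop i).take kB) (l.drop i)[kB]
            ((l.drop i).drop (kB + 1)) S hSk
          rw [hPlen, hMlen, ← hdec] at h5
          exact h5
        -- unfold one step of A's outer loop
        rw [pvLoopA, dif_pos hi, if_neg hS]
        simp only [hfold, hbub]
        -- lengths are preserved, so the induction hypothesis applies
        have hlen' : (l.take i ++ (l.drop i)[kB] :: ((l.drop i).take kB ++ (l.drop i).drop (kB + 1))).length
            = l.length := by
          conv_rhs => rw [hdec]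
          simp
          omega
        rw [← hlen', ih _ (S - kB) (i + 1) (by rw [hlen']; omega)]
        rw [halt]
        -- both sides are P ++ x :: (M ++ Q)-shaped
        have hx : (l.drop i).getD kB 0 = (l.drop i)[kB] := List.getD_eq_getElem _ _ hkd
        have htk : List.take (i + 1) (l.take i) = l.take i :=
          List.take_of_length_le (by rw [hPlen]; omega)
        have hdr : List.drop (i + 1) (l.take i) = [] :=
          List.drop_eq_nil_of_le (by rw [hPlen]; omega)
        rw [hx, List.take_append, List.drop_append, hPlen, htk, hdr,
          show i + 1 - i = 1 by omega]
        simp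

-- ===== VERDICT (by name: the statement is the Claim_ definition above) =====
theorem max_lex_with_swaps_spec : Claim_equal_max_lex_with_swaps := by
  intro arr S _
  unfold Spec_max_lex_with_swaps max_lex_with_swaps max_lex_with_swaps_alt
  rw [pvLoopB_eq_altRec arr.length arr (le_refl _) [] S]
  simpa using pv_main arr.length arr S 0 (by omega)
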